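-- pv_equiv track=rewrite | github.com/klockemel/dropletDetection_dynamicSelfAssemblyProject | dropletDetection/headless_nd2_scaled_droplet.py | group_radii
-- ===== SOURCE A (Python) =====
-- from itertools import zip_longest
--
-- def grouper(iterable, chunksize):
--     args = [iter(iterable)] * chunksize
--     return zip_longest(*args, fillvalue=None)
--
-- def group_radii(hr):
--     '''Groups the radii into small groups spanning chunksize steps. The final group of largest radii will span
--     whatever remaining steps are left, which may be chunksize or less depending on the number of radii searched
--     I left chunksize as 10 for all data processed for 2020 nanotubes in droplets paper.'''
--     # removed the Nones in a clunky way. Try to for and can improve if necessary later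
--     chunksize = 10
--     hr_group = list(grouper(hr, chunksize))
--     hr_group_filtered = []
--     for item in hr_group:
--         item = list(item)
--         item = list(filter(None, item))
--         hr_group_filtered.append(item)
--     return hr_group_filtered
-- ===== SOURCE B (Python) =====
-- def group_radii(hr):
--     '''Groups the radii into small groups spanning chunksize steps. The final group of largest radii will span
--     whatever remaining steps are left, which may be chunksize or less depending on the number of radii searched'''
--     lst = list(hr)
--     out = []
--     for i in range(0, len(lst), 10):
--         out.append(list(filter(None, lst[i:i+10])))
--     return out
-- ===== Notes on version B (the rewrite author's own statement) =====
-- stated objective: simpler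
-- what changed: Replaces the zip_longest/iterator-replication grouper plus a pad-then-strip filtering loop with direct index slicing lst[i:i+10] over range(0, len, 10), so no None padding is ever created or removed.
import Mathlib
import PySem

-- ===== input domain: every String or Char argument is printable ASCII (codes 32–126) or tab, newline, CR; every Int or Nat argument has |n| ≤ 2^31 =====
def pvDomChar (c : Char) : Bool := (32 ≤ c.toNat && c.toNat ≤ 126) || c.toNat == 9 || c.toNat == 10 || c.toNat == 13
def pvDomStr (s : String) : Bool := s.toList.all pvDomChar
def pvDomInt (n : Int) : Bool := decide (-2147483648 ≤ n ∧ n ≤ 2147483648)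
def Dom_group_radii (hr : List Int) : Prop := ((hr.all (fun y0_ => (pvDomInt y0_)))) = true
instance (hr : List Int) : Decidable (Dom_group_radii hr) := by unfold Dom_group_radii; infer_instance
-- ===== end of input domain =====

-- B chunks by index slicing lst[i:i+10] instead of A's zip_longest padding-with-None grouper; objective: simpler.

-- ===== PORT A =====
-- grouper(hr, 10): tuples of 10 items drawn from one shared iterator, last tuple padded with None
def pvGrouper (l : List Int) : List (List (Option Int)) :=
  if l = [] then []
  else ((l.take 10).map some ++ List.replicate (10 - l.length) none) :: pvGrouper (l.drop 10)
termination_by l.length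
decreasing_by
  rename_i h
  have : l.length ≠ 0 := by simpa [List.length_eq_zero_iff] using h
  simp [List.length_drop]; omega

-- filter(None, item): keeps truthy values (drops None and 0), yielding plain ints
def pvFilterNone (o : Option Int) : Option Int :=
  match o with
  | some x => if x ≠ 0 then some x else none
  | none => none

def group_radii (hr : List Int) : List (List Int) :=
  (pvGrouper hr).foldl (fun acc item => acc ++ [item.filterMap pvFilterNone]) []

-- ===== PORT B =====
def group_radii_alt (hr : List Int) : List (List Int) :=
  (PySem.List.pyRange 0 (hr.length : Int) 10).foldl
    (fun acc i =>
      acc ++ [(PySem.List.slice hr (some i) (some (i + 10))).filter (fun x => x != 0)]) []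

-- ===== PRECONDITION & SPEC =====
def Spec_group_radii (hr : List Int) (out : List (List Int)) : Prop := out = group_radii_alt hr
instance (hr : List Int) (out : List (List Int)) : Decidable (Spec_group_radii hr out) := by unfold Spec_group_radii; infer_instance

-- ===== CLAIM (what is proved, stated in full; the proofs are below) =====
def Claim_equal_group_radii : Prop := ∀ (hr : List Int), Dom_group_radii hr → Spec_group_radii hr (group_radii hr)

-- ===== LEMMAS AND PROOFS =====
-- reference form: chunk-of-10 recursion with plain filtering
def pvChunks (l : List Int) : List (List Int) :=
  if l = [] then []
  else (l.take 10).filter (fun x => x != 0) :: pvChunks (l.drop 10)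
termination_by l.length
decreasing_by
  rename_i h
  have : l.length ≠ 0 := by simpa [List.length_eq_zero_iff] using h
  simp [List.length_drop]; omega

theorem pv_foldl_append_map {α β : Type} (f : α → β) :
    ∀ (l : List α) (acc : List β),
      l.foldl (fun a x => a ++ [f x]) acc = acc ++ l.map f := by
  intro l
  induction l with
  | nil => simp
  | cons x xs ih => intro acc; simp [List.foldl_cons, ih]

theorem pv_fm (xs : List Int) :
    xs.filterMap (fun x => if x = 0 then none else some x) = xs.filter (fun x => x != 0) := by
  induction xs with
  | nil => simp
  | cons x t ih => by_cases hx : x = 0 <;> simp [hx, ih]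

theorem pv_rep (m : Nat) :
    (List.replicate m (none : Option Int)).filterMap pvFilterNone = [] := by
  induction m with
  | zero => simp
  | succ _ _ => simp [pvFilterNone]

theorem pv_filterMap_pad (c : List Int) (m : Nat) :
    (c.map some ++ List.replicate m none).filterMap pvFilterNone
      = c.filter (fun x => x != 0) := by
  rw [List.filterMap_append, pv_rep, List.append_nil, List.filterMap_map]
  have : (pvFilterNone ∘ some) = (fun x : Int => if x = 0 then none else some x) := by
    funext x; by_cases hx : x = 0 <;> simp [pvFilterNone, hx]
  rw [this, pv_fm]

theorem pv_A_eq_chunks (l : List Int) : group_radii l = pvChunks l := by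
  unfold group_radii
  rw [pv_foldl_append_map]
  simp only [List.nil_append]
  induction l using pvChunks.induct with
  | case1 =>
      rw [pvGrouper, pvChunks]; simp
  | case2 l h ih =>
      rw [pvGrouper, pvChunks]
      simp only [if_neg h]
      rw [List.map_cons, pv_filterMap_pad, ih]

theorem pv_slice_shift (l : List Int) (k : Nat) :
    PySem.List.slice l (some ((10:Int)*((k+1 : Nat) : Int))) (some ((10:Int)*((k+1 : Nat) : Int)+10))
      = PySem.List.slice (l.drop 10) (some ((10:Int)*(k:Int))) (some ((10:Int)*(k:Int)+10)) := by
  have h2 : (10:Int)*((k+1 : Nat) : Int)+10 = ((10*k+20 : Nat) : Int) := by push_cast; ring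
  have h1 : (10:Int)*((k+1 : Nat) : Int) = ((10*k+10 : Nat) : Int) := by push_cast; ring
  have h4 : (10:Int)*(k:Int)+10 = ((10*k+10 : Nat) : Int) := by push_cast; ring
  have h3 : (10:Int)*(k:Int) = ((10*k : Nat) : Int) := by push_cast; ring
  rw [h2, h1, h4, h3, PySem.List.slice_natCast, PySem.List.slice_natCast, List.drop_drop, Nat.add_comm 10 (10*k)]
  congr 1
  omega

theorem pv_slice_head (l : List Int) :
    PySem.List.slice l (some (0:Int)) (some (10:Int)) = l.take 10 := by
  rw [show (0:Int) = ((0:Nat):Int) by norm_num, show (10:Int) = ((10:Nat):Int) by norm_num,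
    PySem.List.slice_natCast]
  simp

theorem pv_B_eq_chunks (l : List Int) : group_radii_alt l = pvChunks l := by
  unfold group_radii_alt
  rw [pv_foldl_append_map (fun i => (PySem.List.slice l (some i) (some (i + 10))).filter (fun x => x != 0))]
  simp only [List.nil_append]
  induction l using pvChunks.induct with
  | case1 =>
      rw [pvChunks]
      simp [PySem.List.pyRange_of_pos 0 0 (by norm_num : (0:Int) < 10)]
  | case2 l h ih =>
      rw [pvChunks]
      simp only [if_neg h]
      have hn : 1 ≤ l.length := by
        cases l with
        | nil => exact absurd rfl h
        | cons a t => simp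
      set n := l.length with hnn
      have hcnt : (((n:Int) - 0 + 10 - 1) / 10).toNat = (n + 9) / 10 := by omega
      rw [PySem.List.pyRange_of_pos 0 (n:Int) (by norm_num : (0:Int) < 10)]
      rw [if_pos (by exact_mod_cast hn : (0:Int) < (n:Int)), hcnt]
      have hpos : (n + 9) / 10 = ((n + 9) / 10 - 1) + 1 := by omega
      rw [hpos, List.range_succ_eq_map]
      simp only [List.map_cons, List.map_map, Nat.cast_zero, mul_zero, zero_add]
      congr 1
      · rw [pv_slice_head]
      · rw [← ih]
        rw [PySem.List.pyRange_of_pos 0 ((l.drop 10).length : Int) (by norm_num : (0:Int) < 10)]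
        rw [List.length_drop]
        by_cases hle : n ≤ 10
        · have hneg : ¬ ((0:Int) < ((n - 10 : Nat) : Int)) := by
            have : n - 10 = 0 := by omega
            simp [this]
          rw [if_neg hneg]
          have : (n + 9) / 10 - 1 = 0 := by omega
          simp [this]
        · have hlt : (0:Int) < ((n - 10 : Nat) : Int) := by
            have : 0 < n - 10 := by omega
            exact_mod_cast this
          rw [if_pos hlt]
          have hcnt2 : ((((n - 10 : Nat) : Int) - 0 + 10 - 1) / 10).toNat = (n + 9) / 10 - 1 := by omega
          rw [hcnt2, List.map_map]
          simp only [zero_add]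
          refine List.map_congr_left ?_
          intro k _
          simp only [Function.comp_apply]
          show (PySem.List.slice l (some ((10:Int)*((k+1 : Nat):Int))) (some ((10:Int)*((k+1 : Nat):Int) + 10))).filter (fun x => x != 0)
              = (PySem.List.slice (l.drop 10) (some ((10:Int)*(k:Int))) (some ((10:Int)*(k:Int) + 10))).filter (fun x => x != 0)
          rw [pv_slice_shift]

-- ===== VERDICT (by name: the statement is the Claim_ definition above) =====
theorem group_radii_spec : Claim_equal_group_radii := by
  intro hr _
  unfold Spec_group_radii
  rw [pv_A_eq_chunks, pv_B_eq_chunks]
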